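-- pv_equiv track=rewrite | github.com/rodrojgut/decide | decide/postproc/views.py | add_first
-- ===== SOURCE A (Python) =====
-- def add_first(first_list, second_list):
--     """
--         This function alternate the elements of the first list and the second list. The first element of the
--         new list will be the first element of the first list.
--     """
--     pos = 0
--     out = []
--     for i in range(0, max(len(first_list), len(second_list))):
--         if i < len(first_list):
--             out.append({
--                 **first_list[i],
--                 'postproc': pos+1,
--             })
--             pos += 1
--         if i < len(second_list):
--             out.append({
--                 **second_list[i],
--                 'postproc': pos+1,
--             })
--             pos += 1
--     return out
-- ===== SOURCE B (Python) =====
-- def add_first(first_list, second_list):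
--     n = min(len(first_list), len(second_list))
--     tail = first_list if len(first_list) > n else second_list
--
--     def src(k):
--         if k < 2 * n:
--             return first_list[k // 2] if k % 2 == 0 else second_list[k // 2]
--         return tail[k - n]
--
--     return [{**src(k), 'postproc': k + 1}
--             for k in range(len(first_list) + len(second_list))]
-- ===== Notes on version B (the rewrite author's own statement) =====
-- stated objective: alternative
-- what changed: Replaces A's fused sequential merge loop (threading a manual pos counter and appending conditionally per index) with direct index arithmetic: one comprehension over range(len(f)+len(s)) where the source of output slot k is computed in closed form (f[k//2] or s[k//2] below 2*min, else tail[k-n]).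
import Mathlib
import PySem

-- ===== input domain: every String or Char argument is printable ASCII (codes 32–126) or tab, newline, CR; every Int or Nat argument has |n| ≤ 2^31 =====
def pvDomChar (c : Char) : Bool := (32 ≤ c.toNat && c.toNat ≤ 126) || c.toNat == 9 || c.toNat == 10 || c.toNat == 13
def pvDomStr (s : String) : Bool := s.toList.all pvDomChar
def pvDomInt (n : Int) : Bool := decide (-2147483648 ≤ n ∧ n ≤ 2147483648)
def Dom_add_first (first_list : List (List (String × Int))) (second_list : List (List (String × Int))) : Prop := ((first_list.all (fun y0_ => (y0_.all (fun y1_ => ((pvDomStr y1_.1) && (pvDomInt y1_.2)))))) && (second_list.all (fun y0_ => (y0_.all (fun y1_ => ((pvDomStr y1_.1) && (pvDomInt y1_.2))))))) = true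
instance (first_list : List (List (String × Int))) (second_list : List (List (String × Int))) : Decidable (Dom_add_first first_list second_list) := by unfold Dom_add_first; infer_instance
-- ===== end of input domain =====

-- B replaces A's fused merge loop by direct index arithmetic: each output slot k fetches its source element by a closed-form index (k//2 into one of the lists, or k-n into the longer tail); objective: alternative.


-- ===== PORT A =====
-- literal port of A: one loop over range(0, max(len(first_list), len(second_list))) threading (pos, out)
def add_first (first_list : List (List (String × Int))) (second_list : List (List (String × Int))) : List (List (String × Int)) :=
  ((PySem.List.pyRange 0 ((max first_list.length second_list.length : Nat) : Int)).foldl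
    (fun (st : Int × List (List (String × Int))) i =>
      let st :=
        if i < (first_list.length : Int) then
          (st.1 + 1, st.2 ++ [(PySem.Dict.insert (PySem.Dict.mk (PySem.List.pyGetD first_list i [])) "postproc" (st.1 + 1)).items])
        else st
      if i < (second_list.length : Int) then
        (st.1 + 1, st.2 ++ [(PySem.Dict.insert (PySem.Dict.mk (PySem.List.pyGetD second_list i [])) "postproc" (st.1 + 1)).items])
      else st)
    (0, [])).2

-- ===== PORT B =====
-- literal port of B: one comprehension over range(len(f)+len(s)); the source of slot k is computed by index arithmetic (f[k//2] / s[k//2] below 2n, else tail[k-n])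
def add_first_alt (first_list : List (List (String × Int))) (second_list : List (List (String × Int))) : List (List (String × Int)) :=
  let n : Nat := min first_list.length second_list.length
  let tail := if first_list.length > n then first_list else second_list
  let src : Int → List (String × Int) := fun k =>
    if k < 2 * (n : Int) then
      if PySem.Int.mod k 2 = 0 then PySem.List.pyGetD first_list (PySem.Int.floordiv k 2) []
      else PySem.List.pyGetD second_list (PySem.Int.floordiv k 2) []
    else PySem.List.pyGetD tail (k - (n : Int)) []
  (PySem.List.pyRange 0 ((first_list.length + second_list.length : Nat) : Int)).map
    (fun k => (PySem.Dict.insert (PySem.Dict.mk (src k)) "postproc" (k + 1)).items)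

-- ===== PRECONDITION & SPEC =====
def Spec_add_first (first_list : List (List (String × Int))) (second_list : List (List (String × Int))) (out : List (List (String × Int))) : Prop := out = add_first_alt first_list second_list
instance (first_list : List (List (String × Int))) (second_list : List (List (String × Int))) (out : List (List (String × Int))) : Decidable (Spec_add_first first_list second_list out) := by unfold Spec_add_first; infer_instance

-- ===== CLAIM (what is proved, stated in full; the proofs are below) =====
def Claim_equal_add_first : Prop := ∀ (first_list : List (List (String × Int))) (second_list : List (List (String × Int))), Dom_add_first first_list second_list → Spec_add_first first_list second_list (add_first first_list second_list)

-- ===== LEMMAS AND PROOFS =====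

-- canonical interleaving of two lists (the reference value both programs compute)
def pvMix {α : Type} : List α → List α → List α
  | [], ys => ys
  | x :: xs, [] => x :: xs
  | x :: xs, y :: ys => x :: y :: pvMix xs ys

theorem pvMix_nil_right {α : Type} (xs : List α) : pvMix xs [] = xs := by
  cases xs <;> rfl

theorem pvMix_length {α : Type} (f s : List α) : (pvMix f s).length = f.length + s.length := by
  induction f generalizing s with
  | nil => simp [pvMix]
  | cons a f' ih => cases s with
    | nil => simp [pvMix]
    | cons b s' => simp [pvMix, ih]; omega

-- stamp each element with its 1-based position starting at k (both sides reduce to this)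
def pvStamp (xs : List (List (String × Int))) (k : Int) : List (List (String × Int)) :=
  (PySem.List.enumerate xs k).map
    (fun p => (PySem.Dict.insert (PySem.Dict.mk p.2) "postproc" p.1).items)

theorem pvMix_take_succ {α : Type} (f s : List α) (N : Nat) :
    pvMix (f.take (N + 1)) (s.take (N + 1)) =
      pvMix (f.take N) (s.take N) ++ (f[N]?.toList ++ s[N]?.toList) := by
  induction N generalizing f s with
  | zero =>
    cases f with
    | nil => cases s <;> simp [pvMix]
    | cons a f' => cases s <;> simp [pvMix]
  | succ n ih =>
    cases f with
    | nil =>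
      cases s with
      | nil => simp [pvMix]
      | cons b s' =>
        simp only [List.take_nil, pvMix]
        rw [List.take_add_one]
        simp
    | cons a f' =>
      cases s with
      | nil =>
        simp only [List.take_nil, pvMix_nil_right, List.getElem?_nil]
        rw [List.take_add_one]
        simp
      | cons b s' =>
        simp only [List.take, pvMix, List.getElem?_cons_succ]
        rw [ih f' s']
        simp

-- invariant of A's loop: after N iterations, pos = |pvMix of the takes| and out = its stamping from 1
theorem add_first_loop (f s : List (List (String × Int))) (N : Nat) :
    (PySem.List.pyRange 0 (N : Int)).foldl
      (fun (st : Int × List (List (String × Int))) i =>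
        let st :=
          if i < (f.length : Int) then
            (st.1 + 1, st.2 ++ [(PySem.Dict.insert (PySem.Dict.mk (PySem.List.pyGetD f i [])) "postproc" (st.1 + 1)).items])
          else st
        if i < (s.length : Int) then
          (st.1 + 1, st.2 ++ [(PySem.Dict.insert (PySem.Dict.mk (PySem.List.pyGetD s i [])) "postproc" (st.1 + 1)).items])
        else st)
      (0, []) =
    (((pvMix (f.take N) (s.take N)).length : Int), pvStamp (pvMix (f.take N) (s.take N)) 1) := by
  induction N with
  | zero => simp [PySem.List.pyRange, pvMix, pvStamp]
  | succ n ih =>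
    have hle : (0 : Int) ≤ (n : Int) := by positivity
    rw [show ((((n : Nat) + 1 : Nat)) : Int) = (n : Int) + 1 by push_cast; ring,
        PySem.List.pyRange_one_succ_right hle, List.foldl_append, ih]
    simp only [List.foldl_cons, List.foldl_nil]
    rw [pvMix_take_succ]
    rcases Nat.lt_or_ge n f.length with hf | hf <;> rcases Nat.lt_or_ge n s.length with hs | hs <;>
      simp [Nat.cast_lt, hf, hs, Nat.not_lt.mpr, PySem.List.pyGetD_natCast,
            List.getD_eq_getElem?_getD, pvStamp, PySem.List.enumerate_append,
            add_comm] <;> omega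

-- closed-form characterisation of the k-th element of the interleaving (B's index arithmetic)
theorem pvMix_getD (f s : List (List (String × Int))) (k : Nat) :
    (pvMix f s).getD k [] =
      if k < 2 * min f.length s.length then
        (if k % 2 = 0 then f.getD (k / 2) [] else s.getD (k / 2) [])
      else (if min f.length s.length < f.length then f else s).getD (k - min f.length s.length) [] := by
  induction f generalizing s k with
  | nil => simp [pvMix]
  | cons a f' ih =>
    cases s with
    | nil => simp [pvMix_nil_right]
    | cons b s' =>
      match k with
      | 0 => simp [pvMix, Nat.succ_min_succ]
      | 1 => simp [pvMix, Nat.succ_min_succ]; omega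
      | (j + 2) =>
        have := ih s' j
        simp only [pvMix, List.getD_cons_succ, this, Nat.succ_min_succ, List.length_cons]
        by_cases h1 : j < 2 * min f'.length s'.length
        · have h2 : j + 2 < 2 * (min f'.length s'.length + 1) := by omega
          simp only [h1, if_pos h2]
          have : (j + 2) / 2 = j / 2 + 1 := by omega
          have hm : (j + 2) % 2 = j % 2 := by omega
          rw [this, hm]
          by_cases he : j % 2 = 0 <;> simp [he]
        · have h2 : ¬ (j + 2 < 2 * (min f'.length s'.length + 1)) := by omega
          simp only [h1, if_neg h2]
          have hj : min f'.length s'.length ≤ j := by omega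
          have hsub : j + 2 - (min f'.length s'.length + 1) = (j - min f'.length s'.length) + 1 := by omega
          rw [hsub]
          by_cases ht : min f'.length s'.length < f'.length
          · simp [ht, show min f'.length s'.length + 1 < f'.length + 1 from by omega]
          · simp [ht, show ¬ (min f'.length s'.length + 1 < f'.length + 1) from by omega]

-- B equals the stamped interleaving
theorem alt_eq_stamp (f s : List (List (String × Int))) :
    add_first_alt f s = pvStamp (pvMix f s) 1 := by
  unfold add_first_alt pvStamp
  dsimp only
  apply List.ext_getElem
  · simp only [List.length_map, PySem.List.length_pyRange_one, PySem.List.length_enumerate,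
               pvMix_length]
    omega
  · intro k h1 h2
    have hk : k < f.length + s.length := by
      simp only [List.length_map, PySem.List.length_pyRange_one] at h1
      omega
    simp only [List.getElem_map, PySem.List.getElem_pyRange_one, PySem.List.getElem_enumerate,
               zero_add]
    rw [show (1 : Int) + (k : Int) = (k : Int) + 1 from by ring]
    suffices hsrc :
        (if (k : Int) < 2 * ((min f.length s.length : Nat) : Int) then
          if PySem.Int.mod (k : Int) 2 = 0 then PySem.List.pyGetD f (PySem.Int.floordiv (k : Int) 2) []
          else PySem.List.pyGetD s (PySem.Int.floordiv (k : Int) 2) []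
        else PySem.List.pyGetD (if f.length > min f.length s.length then f else s) ((k : Int) - ((min f.length s.length : Nat) : Int)) []) =
          (pvMix f s)[k]'(by rw [pvMix_length]; exact hk) by
      rw [hsrc]
    have hget : (pvMix f s)[k]'(by rw [pvMix_length]; exact hk) = (pvMix f s).getD k [] := by
      rw [List.getD_eq_getElem?_getD, List.getElem?_eq_getElem (by rw [pvMix_length]; exact hk)]
      rfl
    rw [hget, pvMix_getD]
    by_cases hlt : (k : Int) < 2 * ((min f.length s.length : Nat) : Int)
    · have hltn : k < 2 * min f.length s.length := by exact_mod_cast hlt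
      rw [if_pos hlt, if_pos hltn]
      have hdiv : PySem.Int.floordiv (k : Int) 2 = ((k / 2 : Nat) : Int) := by
        exact_mod_cast PySem.Int.floordiv_natCast k 2
      have hmod : PySem.Int.mod (k : Int) 2 = ((k % 2 : Nat) : Int) := by
        exact_mod_cast PySem.Int.mod_natCast k 2
      rw [hdiv, hmod]
      by_cases he : k % 2 = 0
      · have he' : ((k % 2 : Nat) : Int) = 0 := by exact_mod_cast he
        rw [if_pos he', if_pos he, PySem.List.pyGetD_natCast]
      · have he' : ¬ ((k % 2 : Nat) : Int) = 0 := by exact_mod_cast he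
        rw [if_neg he', if_neg he, PySem.List.pyGetD_natCast]
    · have hge : ¬ (k < 2 * min f.length s.length) := fun h => hlt (by exact_mod_cast h)
      rw [if_neg hlt, if_neg hge]
      rw [show (k : Int) - ((min f.length s.length : Nat) : Int) = ((k - min f.length s.length : Nat) : Int) from by omega]
      by_cases ht : min f.length s.length < f.length
      · rw [if_pos ht, PySem.List.pyGetD_natCast]
      · rw [if_neg ht, PySem.List.pyGetD_natCast]

-- ===== VERDICT (by name: the statement is the Claim_ definition above) =====
theorem add_first_spec : Claim_equal_add_first := by
  intro f s _
  show add_first f s = add_first_alt f s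
  unfold add_first
  rw [add_first_loop f s (max f.length s.length)]
  simp only [List.take_of_length_le (le_max_left f.length s.length),
             List.take_of_length_le (le_max_right f.length s.length)]
  rw [alt_eq_stamp]
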